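-- pv_equiv track=rewrite | github.com/pypi-data/pypi-mirror-401 | packages/stylometry-cli/stylometry_cli-1.0.0-py3-none-any.whl/stylometry/normalizer.py | _remove_quote_blocks
-- ===== SOURCE A (Python) =====
-- def _remove_quote_blocks(text: str, min_lines: int) -> str:
--     """Removes blocks where every line starts with > and the block is at least min_lines long."""
--     lines = text.split("\n")
--     out = []
--     i = 0
--     while i < len(lines):
--         if lines[i].strip().startswith(">"):
--             start = i
--             while i < len(lines) and lines[i].strip().startswith(">"):
--                 i += 1
--             if (i - start) < min_lines:
--                 out.extend(lines[start:i])
--             else: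
--                 # Block removed
--                 pass
--         else:
--             out.append(lines[i])
--             i += 1
--     return "\n".join(out)
-- ===== SOURCE B (Python) =====
-- def _remove_quote_blocks(text: str, min_lines: int) -> str:
--     """Removes blocks where every line starts with > and the block is at least min_lines long."""
--     runs = []
--     for line in text.split("\n"):
--         q = line.strip().startswith(">")
--         if runs and runs[-1][0] == q:
--             runs[-1][1].append(line)
--         else:
--             runs.append((q, [line]))
--     out = []
--     for q, run in runs:
--         if not (q and len(run) >= min_lines):
--             out.extend(run)
--     return "\n".join(out)
-- ===== Notes on version B (the rewrite author's own statement) =====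
-- stated objective: alternative
-- what changed: Replaced A's index-driven nested while loops (inner scan per quote block) by a single fold that groups all lines into maximal runs keyed by the quote predicate, followed by a separate filtering pass over the runs.
import Mathlib
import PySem

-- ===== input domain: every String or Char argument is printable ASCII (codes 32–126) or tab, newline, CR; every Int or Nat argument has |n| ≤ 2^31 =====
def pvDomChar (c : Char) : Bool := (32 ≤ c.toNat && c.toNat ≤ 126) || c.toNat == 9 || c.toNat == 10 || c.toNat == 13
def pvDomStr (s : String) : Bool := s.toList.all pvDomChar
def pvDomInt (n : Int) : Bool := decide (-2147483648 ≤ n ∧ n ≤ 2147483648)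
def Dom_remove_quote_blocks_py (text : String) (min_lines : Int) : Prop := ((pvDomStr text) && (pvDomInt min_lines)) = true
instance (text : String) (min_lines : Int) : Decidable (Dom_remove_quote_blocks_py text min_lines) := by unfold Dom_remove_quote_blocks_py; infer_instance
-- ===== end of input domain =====

-- B replaces A's index-driven nested while loops by one fold grouping the lines into
-- maximal runs plus a separate filtering pass over the runs (objective: alternative).

-- ===== PORT A =====
-- lines[i].strip().startswith(">")
def pvQ (l : String) : Bool := PySem.Str.startswith (PySem.Str.strip l) ">"

-- the outer while; the inner while from i = start is the maximal pvQ-prefix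
def pvLoopA (minL : Int) : List String → List String
  | [] => []
  | l :: rest =>
    if h : pvQ l = true then
      let blk := List.takeWhile pvQ (l :: rest)
      let rest' := List.dropWhile pvQ (l :: rest)
      (if (blk.length : Int) < minL then blk else []) ++ pvLoopA minL rest'
    else
      l :: pvLoopA minL rest
  termination_by ls => ls.length
  decreasing_by
  · simp [List.dropWhile, h]
    exact List.length_dropWhile_le pvQ rest
  · simp

def remove_quote_blocks_py (text : String) (min_lines : Int) : String :=
  PySem.Str.join "\n" (pvLoopA min_lines ((PySem.Str.split? text "\n").getD []))

-- ===== PORT B =====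
-- the first loop's body: extend the last run or start a new one
def pvStep (runs : List (Bool × List String)) (line : String) : List (Bool × List String) :=
  let q := pvQ line
  match runs.getLast? with
  | some last =>
      if last.1 == q then runs.dropLast ++ [(last.1, last.2 ++ [line])]
      else runs ++ [(q, [line])]
  | none => [(q, [line])]

def remove_quote_blocks_py_alt (text : String) (min_lines : Int) : String :=
  let runs := List.foldl pvStep [] ((PySem.Str.split? text "\n").getD [])
  let out := runs.foldl
    (fun out r => if !(r.1 && decide (min_lines ≤ (r.2.length : Int))) then out ++ r.2 else out) []
  PySem.Str.join "\n" out

-- ===== PRECONDITION & SPEC =====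
def Spec_remove_quote_blocks_py (text : String) (min_lines : Int) (out : String) : Prop := out = remove_quote_blocks_py_alt text min_lines
instance (text : String) (min_lines : Int) (out : String) : Decidable (Spec_remove_quote_blocks_py text min_lines out) := by unfold Spec_remove_quote_blocks_py; infer_instance

-- ===== CLAIM (what is proved, stated in full; the proofs are below) =====
def Claim_equal_remove_quote_blocks_py : Prop := ∀ (text : String) (min_lines : Int), Dom_remove_quote_blocks_py text min_lines → Spec_remove_quote_blocks_py text min_lines (remove_quote_blocks_py text min_lines)

-- ===== LEMMAS AND PROOFS =====

-- the filtering pass, as a flatMap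
def pvKeep (minL : Int) (r : Bool × List String) : List String :=
  if !(r.1 && decide (minL ≤ (r.2.length : Int))) then r.2 else []

theorem pvStep_append (rs : List (Bool × List String)) (x : Bool × List String) (l : String) :
    pvStep (rs ++ [x]) l = rs ++ pvStep [x] l := by
  simp [pvStep]
  split <;> simp

theorem pvFoldl_append (ls : List String) (rs : List (Bool × List String))
    (x : Bool × List String) :
    List.foldl pvStep (rs ++ [x]) ls = rs ++ List.foldl pvStep [x] ls := by
  induction ls generalizing rs x with
  | nil => simp
  | cons l tl ih =>
    simp only [List.foldl_cons, pvStep_append]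
    by_cases h : x.1 == pvQ l
    · have hx : pvStep [x] l = [(x.1, x.2 ++ [l])] := by simp [pvStep, h]
      rw [hx, ih]
    · have hx : pvStep [x] l = [x] ++ [(pvQ l, [l])] := by
        simp [pvStep]; simp_all
      rw [hx, ← List.append_assoc, ih (rs ++ [x]), ih [x], List.append_assoc]

theorem pvFoldl_run (ls : List String) (k : Bool) (g : List String) :
    List.foldl pvStep [(k, g)] ls =
      (k, g ++ ls.takeWhile (fun x => pvQ x == k)) ::
        List.foldl pvStep [] (ls.dropWhile (fun x => pvQ x == k)) := by
  induction ls generalizing g with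
  | nil => simp
  | cons l tl ih =>
    by_cases h : pvQ l == k
    · have hk : (k == pvQ l) = true := by simp_all
      have hx : pvStep [(k, g)] l = [(k, g ++ [l])] := by simp [pvStep, hk]
      simp only [List.foldl_cons, hx, ih, List.takeWhile, List.dropWhile, h]
      simp
    · have hk : (k == pvQ l) = false := by
        cases k <;> cases hql : pvQ l <;> simp_all
      have hx : pvStep [(k, g)] l = [(k, g)] ++ [(pvQ l, [l])] := by simp [pvStep, hk]
      simp only [List.foldl_cons, hx, pvFoldl_append, List.takeWhile, List.dropWhile, h]
      simp [pvStep]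

theorem pvFlat_eq (minL : Int) (rs : List (Bool × List String)) (acc : List String) :
    List.foldl
      (fun out r => if !(r.1 && decide (minL ≤ (r.2.length : Int))) then out ++ r.2 else out)
      acc rs = acc ++ rs.flatMap (pvKeep minL) := by
  induction rs generalizing acc with
  | nil => simp
  | cons r tl ih =>
    simp only [List.foldl_cons, List.flatMap_cons, ih, pvKeep]
    by_cases hc : (r.1 && decide (minL ≤ ((r.2).length : Int))) = true
    · simp [hc]
    · simp [hc]

-- A's quote-branch takeWhile/dropWhile predicate agrees with B's grouping predicate on q = true
theorem pvTake_true (ls : List String) :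
    ls.takeWhile (fun x => pvQ x == true) = ls.takeWhile pvQ ∧
    ls.dropWhile (fun x => pvQ x == true) = ls.dropWhile pvQ := by
  induction ls with
  | nil => simp
  | cons l tl ih => simp [List.takeWhile, List.dropWhile]

set_option maxHeartbeats 1000000 in
theorem pvMain (minL : Int) (ls : List String) :
    pvLoopA minL ls = (List.foldl pvStep [] ls).flatMap (pvKeep minL) := by
  match ls with
  | [] => simp [pvLoopA]
  | l :: rest =>
    have hfold : List.foldl pvStep [] (l :: rest) =
        (pvQ l, l :: rest.takeWhile (fun x => pvQ x == pvQ l)) ::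
          List.foldl pvStep [] (rest.dropWhile (fun x => pvQ x == pvQ l)) := by
      have : List.foldl pvStep [] (l :: rest) = List.foldl pvStep [(pvQ l, [l])] rest := by
        simp [List.foldl_cons, pvStep]
      rw [this, pvFoldl_run]; simp
    by_cases h : pvQ l = true
    · rw [pvLoopA]
      simp only [h, dite_true]
      rw [hfold, h, List.flatMap_cons]
      have ht := (pvTake_true rest).1
      have hd := (pvTake_true rest).2
      have hrest' : List.dropWhile pvQ (l :: rest) = rest.dropWhile (fun x => pvQ x == true) := by
        simp [List.dropWhile, h]
      have hblk : List.takeWhile pvQ (l :: rest) = l :: rest.takeWhile (fun x => pvQ x == true) := by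
        simp [List.takeWhile, h]
      rw [hrest', hblk]
      have ih := pvMain minL (rest.dropWhile (fun x => pvQ x == true))
      rw [ih]
      congr 1
      simp only [pvKeep, Bool.true_and]
      split <;> split <;> simp_all
    · rw [pvLoopA]
      simp only [h]
      rw [hfold]
      have hq : pvQ l = false := by simp_all
      rw [hq, List.flatMap_cons]
      have hkeep : pvKeep minL (false, l :: rest.takeWhile (fun x => pvQ x == false)) =
          l :: rest.takeWhile (fun x => pvQ x == false) := by simp [pvKeep]
      rw [hkeep]
      -- remains: l :: pvLoopA minL rest = (l :: take) ++ flat (foldl [] drop)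
      have ih := pvMain minL rest
      rw [ih]
      match rest with
      | [] => simp
      | r :: tl =>
        by_cases hr : pvQ r = false
        · have : List.foldl pvStep [] (r :: tl) =
              (false, r :: tl.takeWhile (fun x => pvQ x == false)) ::
                List.foldl pvStep [] (tl.dropWhile (fun x => pvQ x == false)) := by
            have : List.foldl pvStep [] (r :: tl) = List.foldl pvStep [(pvQ r, [r])] tl := by
              simp [List.foldl_cons, pvStep]
            rw [this, hr, pvFoldl_run]; simp
          rw [this]
          simp [List.takeWhile, List.dropWhile, hr, pvKeep]
        · simp [List.takeWhile, List.dropWhile, hr]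
  termination_by ls.length
  decreasing_by
  · simp
    exact List.length_dropWhile_le _ rest
  · simp

-- ===== VERDICT (by name: the statement is the Claim_ definition above) =====
theorem remove_quote_blocks_py_spec : Claim_equal_remove_quote_blocks_py := by
  intro text min_lines _
  unfold Spec_remove_quote_blocks_py remove_quote_blocks_py remove_quote_blocks_py_alt
  simp only [pvMain, pvFlat_eq, List.nil_append]
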